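-- pv_equiv track=rewrite | github.com/aukrasnov/dev_dao | stepik_algorithms_methods/4_1_3_sum.py | diff_numbers
-- ===== SOURCE A (Python) =====
-- def diff_numbers(remaining):
--     answer = []
--     number = 1
--
--     while True:
--         if remaining == 0:
--             break
--
--         if remaining - number <= number:
--             answer.append(remaining)
--             break
--
--         answer.append(number)
--         remaining -= number
--         number += 1
--
--     return answer
-- ===== SOURCE B (Python) =====
-- def diff_numbers(remaining):
--     if remaining == 0:
--         return []
--     if remaining <= 2:
--         return [remaining]
--     # binary search for the largest k with k*(k+1)//2 <= remaining
--     lo, hi = 0, remaining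
--     while lo < hi:
--         mid = (lo + hi + 1) // 2
--         if mid * (mid + 1) // 2 <= remaining:
--             lo = mid
--         else:
--             hi = mid - 1
--     return list(range(1, lo)) + [remaining - lo * (lo - 1) // 2]
-- ===== Notes on version B (the rewrite author's own statement) =====
-- stated objective: alternative
-- what changed: Replaces A's one-by-one greedy subtraction loop with a binary search for the largest k whose triangular number is at most remaining, then emits the full run of small numbers plus the leftover in one shot.
import Mathlib
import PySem

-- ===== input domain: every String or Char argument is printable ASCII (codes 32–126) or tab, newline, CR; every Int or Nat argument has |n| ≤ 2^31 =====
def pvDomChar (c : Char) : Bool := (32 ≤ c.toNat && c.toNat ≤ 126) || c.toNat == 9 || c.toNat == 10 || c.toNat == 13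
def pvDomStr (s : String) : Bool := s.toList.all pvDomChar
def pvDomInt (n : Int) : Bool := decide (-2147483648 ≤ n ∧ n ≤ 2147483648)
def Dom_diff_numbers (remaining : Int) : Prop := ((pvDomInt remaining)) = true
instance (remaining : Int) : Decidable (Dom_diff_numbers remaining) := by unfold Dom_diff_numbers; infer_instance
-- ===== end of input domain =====

-- B replaces A's one-by-one greedy subtraction loop by a binary search for the largest k whose
-- triangular number is at most remaining, then emits the run of small numbers plus the leftover in one shot.

-- ===== PORT A =====
-- A's 'while True' loop; 'number' starts at 1 and only ever increases, carried as a Nat counter.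
def diffLoop (remaining : Int) (number : Nat) : List Int :=
  if remaining = 0 then []
  else if remaining - (number : Int) ≤ (number : Int) then [remaining]
  else (number : Int) :: diffLoop (remaining - (number : Int)) (number + 1)
termination_by (remaining - (number : Int)).toNat
decreasing_by simp only [Nat.cast_add, Nat.cast_one]; omega

def diff_numbers (remaining : Int) : List Int := diffLoop remaining 1

-- ===== PORT B =====
-- Source B's while-loop: binary search for the largest k ≥ lo with k*(k+1)//2 ≤ remaining.
def bsLoop (remaining lo hi : Int) : Int :=
  if lo < hi then
    let mid := PySem.Int.floordiv (lo + hi + 1) 2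
    if PySem.Int.floordiv (mid * (mid + 1)) 2 ≤ remaining then bsLoop remaining mid hi
    else bsLoop remaining lo (mid - 1)
  else lo
termination_by (hi - lo).toNat
decreasing_by
  all_goals
    have h := PySem.Int.floordiv_two_mid_bounds (show lo + 1 ≤ hi by omega)
    have e : lo + 1 + hi = lo + hi + 1 := by ring
    rw [e] at h
    omega

def diff_numbers_alt (remaining : Int) : List Int :=
  if remaining = 0 then []
  else if remaining ≤ 2 then [remaining]
  else
    let lo := bsLoop remaining 0 remaining
    PySem.List.pyRange 1 lo 1 ++ [remaining - PySem.Int.floordiv (lo * (lo - 1)) 2]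

-- ===== PRECONDITION & SPEC =====
def Spec_diff_numbers (remaining : Int) (out : List Int) : Prop := out = diff_numbers_alt remaining
instance (remaining : Int) (out : List Int) : Decidable (Spec_diff_numbers remaining out) := by unfold Spec_diff_numbers; infer_instance

-- ===== CLAIM (what is proved, stated in full; the proofs are below) =====
def Claim_equal_diff_numbers : Prop := ∀ (remaining : Int), Dom_diff_numbers remaining → Spec_diff_numbers remaining (diff_numbers remaining)

-- ===== LEMMAS AND PROOFS =====

-- a*(a+1) is even, so Python's '//2' of it is exact
lemma half_mul_succ (a : Int) : 2 * PySem.Int.floordiv (a * (a + 1)) 2 = a * (a + 1) := by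
  rw [PySem.Int.floordiv_eq_ediv_of_pos (by norm_num)]
  obtain ⟨c, hc⟩ := Int.even_mul_succ_self a
  omega

lemma floordiv_half_le_iff (a r : Int) :
    PySem.Int.floordiv (a * (a + 1)) 2 ≤ r ↔ a * (a + 1) ≤ 2 * r := by
  have h := half_mul_succ a
  rw [PySem.Int.floordiv_eq_ediv_of_pos (by norm_num)] at h ⊢
  omega

-- binary-search invariant: if lo admits and hi+1 refuses, the result k admits and k+1 refuses
lemma bsLoop_spec (remaining : Int) : ∀ (n : Nat) (lo hi : Int), (hi - lo).toNat = n →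
    lo ≤ hi → lo * (lo + 1) ≤ 2 * remaining → 2 * remaining < (hi + 1) * (hi + 2) →
    lo ≤ bsLoop remaining lo hi ∧ bsLoop remaining lo hi ≤ hi ∧
      bsLoop remaining lo hi * (bsLoop remaining lo hi + 1) ≤ 2 * remaining ∧
      2 * remaining < (bsLoop remaining lo hi + 1) * (bsLoop remaining lo hi + 2) := by
  intro n
  induction n using Nat.strong_induction_on with
  | _ n ih =>
    intro lo hi hn hle hlo hhi
    rw [bsLoop]
    by_cases hlt : lo < hi
    · simp only [hlt, if_true]
      have hmid := PySem.Int.floordiv_two_mid_bounds (show lo + 1 ≤ hi by omega)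
      have e : lo + 1 + hi = lo + hi + 1 := by ring
      rw [e] at hmid
      set mid := PySem.Int.floordiv (lo + hi + 1) 2 with hm
      by_cases hc : PySem.Int.floordiv (mid * (mid + 1)) 2 ≤ remaining
      · simp only [hc, if_true]
        have hcc : mid * (mid + 1) ≤ 2 * remaining := (floordiv_half_le_iff mid remaining).mp hc
        exact ⟨by have := (ih (hi - mid).toNat (by omega) mid hi rfl (by omega) hcc hhi).1; omega,
          (ih (hi - mid).toNat (by omega) mid hi rfl (by omega) hcc hhi).2⟩
      · simp only [hc, if_false]
        have hcc : ¬ mid * (mid + 1) ≤ 2 * remaining := fun h => hc ((floordiv_half_le_iff mid remaining).mpr h)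
        have hub : 2 * remaining < (mid - 1 + 1) * (mid - 1 + 2) := by
          have : (mid - 1 + 1) * (mid - 1 + 2) = mid * (mid + 1) := by ring
          omega
        have h := ih (mid - 1 - lo).toNat (by omega) lo (mid - 1) rfl (by omega) hlo hub
        exact ⟨h.1, by omega, h.2.2⟩
    · simp only [hlt, if_false]
      have : hi = lo := by omega
      subst this
      exact ⟨le_refl _, le_refl _, hlo, hhi⟩

-- A's loop, characterised: starting at counter n, with k the 'last full number' determined by the
-- bracketing conditions, it emits n, n+1, …, k-1 and then the leftover t.
lemma diffLoop_eq (remaining : Int) : ∀ (d : Nat) (n : Nat) (k t : Int), (k - (n : Int)).toNat = d →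
    1 ≤ n → (n : Int) ≤ k →
    k * (k + 1) - ((n : Int) - 1) * (n : Int) ≤ 2 * remaining →
    2 * remaining < (k + 1) * (k + 2) - ((n : Int) - 1) * (n : Int) →
    2 * t = 2 * remaining - ((k - 1) * k - ((n : Int) - 1) * (n : Int)) →
    diffLoop remaining n = PySem.List.pyRange (n : Int) k 1 ++ [t] := by
  intro d
  induction d generalizing remaining with
  | zero =>
    intro n k t hd h1 hnk hlo hhi ht
    have hk : k = (n : Int) := by omega
    subst hk
    have e1 : (n : Int) * ((n : Int) + 1) - ((n : Int) - 1) * (n : Int) = 2 * (n : Int) := by ring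
    have e2 : ((n : Int) + 1) * ((n : Int) + 2) - ((n : Int) - 1) * (n : Int) = 4 * (n : Int) + 2 := by ring
    have e3 : ((n : Int) - 1) * (n : Int) - ((n : Int) - 1) * (n : Int) = 0 := by ring
    rw [e1] at hlo; rw [e2] at hhi
    have hn1 : (1 : Int) ≤ (n : Int) := by exact_mod_cast h1
    rw [diffLoop]
    rw [if_neg (by omega), if_pos (by omega)]
    rw [PySem.List.pyRange_one_eq_nil (le_refl _)]
    have : t = remaining := by omega
    rw [this]; rfl
  | succ d ihd =>
    intro n k t hd h1 hnk hlo hhi ht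
    have hn1 : (1 : Int) ≤ (n : Int) := by exact_mod_cast h1
    have hnk' : (n : Int) + 1 ≤ k := by omega
    have hkk : ((n : Int) + 1) * ((n : Int) + 2) ≤ k * (k + 1) := by nlinarith
    have e0 : ((n : Int) + 1) * ((n : Int) + 2) - ((n : Int) - 1) * (n : Int) = 4 * (n : Int) + 2 := by
      ring
    have hr : 2 * (n : Int) < remaining := by omega
    rw [diffLoop, if_neg (by omega), if_neg (by omega)]
    have ecast : ((n + 1 : Nat) : Int) = (n : Int) + 1 := by push_cast; ring
    have hrec := ihd (remaining - (n : Int)) (n + 1) k t (by omega) (by omega)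
      (by rw [ecast]; omega)
      (by rw [ecast]; nlinarith [hlo])
      (by rw [ecast]; nlinarith [hhi])
      (by rw [ecast]; nlinarith [ht])
    have hcons := PySem.List.pyRange_one_cons (show ((n : Int)) < k by omega)
    rw [hcons, List.cons_append, ← ecast, hrec]

-- ===== VERDICT (by name: the statement is the Claim_ definition above) =====
theorem diff_numbers_spec : Claim_equal_diff_numbers := by
  intro remaining _
  unfold Spec_diff_numbers diff_numbers diff_numbers_alt
  by_cases h0 : remaining = 0
  · rw [diffLoop, if_pos h0, if_pos h0]
  · by_cases h2 : remaining ≤ 2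
    · rw [diffLoop, if_neg h0, if_pos (by push_cast; omega), if_neg h0, if_pos h2]
    · rw [if_neg h0, if_neg h2]
      have h3 : 3 ≤ remaining := by omega
      have hk := bsLoop_spec remaining (remaining - 0).toNat 0 remaining rfl (by omega)
        (by omega) (by nlinarith)
      set k := bsLoop remaining 0 remaining with hkdef
      have hk1 : 1 ≤ k := by nlinarith [hk.1, hk.2.2.2]
      have heven : 2 * PySem.Int.floordiv (k * (k - 1)) 2 = k * (k - 1) := by
        have := half_mul_succ (k - 1)
        have e : (k - 1) * (k - 1 + 1) = k * (k - 1) := by ring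
        rw [e] at this
        exact this
      have := diffLoop_eq remaining (k - 1).toNat 1 k
        (remaining - PySem.Int.floordiv (k * (k - 1)) 2)
        (by push_cast; omega) (le_refl _) (by push_cast; omega)
        (by push_cast [Nat.cast_one]; have := hk.2.2.1; nlinarith)
        (by push_cast [Nat.cast_one]; have := hk.2.2.2; nlinarith)
        (by push_cast [Nat.cast_one]
            have e : (k - 1) * k = k * (k - 1) := by ring
            omega)
      rw [this]
      norm_num
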